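-- pv_equiv track=rewrite | github.com/NoobCake123/2021-teach-kids-python | age3-acsl/2013-2014.py | mults
-- ===== SOURCE A (Python) =====
-- def mults(letterscoresnplaces):
--     letterscores = letterscoresnplaces[0]
--     isdouble = False
--     istriple = False
--     places = letterscoresnplaces[1]
--     for i in range(len(places)):
--         if places[i] % 6 == 3:
--             letterscores[i] = letterscores[i]*2
--         elif places[i] % 5 == 0:
--             letterscores[i] = letterscores[i]*3
--         elif places[i] % 7 == 0 and places[i] % 8 != 0:
--             isdouble = True
--         elif places[i] % 8 == 0:
--             istriple = True
--     return [letterscores,isdouble,istriple]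
-- ===== SOURCE B (Python) =====
-- def mults(letterscoresnplaces):
--     letterscores = letterscoresnplaces[0]
--     places = letterscoresnplaces[1]
--     # pass 1: apply the multipliers in place (same precedence as the original)
--     for i, p in enumerate(places):
--         if p % 6 == 3:
--             letterscores[i] *= 2
--         elif p % 5 == 0:
--             letterscores[i] *= 3
--     # passes 2/3: the flags are plain existence scans encoding the elif precedence
--     isdouble = any(p % 6 != 3 and p % 5 != 0 and p % 7 == 0 and p % 8 != 0 for p in places)
--     istriple = any(p % 6 != 3 and p % 5 != 0 and p % 8 == 0 for p in places)
--     return [letterscores, isdouble, istriple]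
-- ===== Notes on version B (the rewrite author's own statement) =====
-- stated objective: simpler
-- what changed: One state-machine loop threading two flag accumulators is decomposed into a multiplier-only in-place pass plus two independent any() existence scans whose predicates spell out the elif precedence.
import Mathlib
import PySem

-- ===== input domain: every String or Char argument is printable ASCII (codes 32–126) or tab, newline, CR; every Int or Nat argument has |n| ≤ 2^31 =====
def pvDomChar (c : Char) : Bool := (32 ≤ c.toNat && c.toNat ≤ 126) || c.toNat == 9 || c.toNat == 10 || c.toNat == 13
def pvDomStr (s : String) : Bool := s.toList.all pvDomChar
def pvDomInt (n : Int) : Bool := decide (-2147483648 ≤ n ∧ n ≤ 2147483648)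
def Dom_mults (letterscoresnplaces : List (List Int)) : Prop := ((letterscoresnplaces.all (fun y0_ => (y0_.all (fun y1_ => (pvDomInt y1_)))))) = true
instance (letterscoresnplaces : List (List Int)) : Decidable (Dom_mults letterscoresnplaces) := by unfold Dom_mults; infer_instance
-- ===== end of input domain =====

-- B decomposes A's single flag-threading loop into a multiplier-only pass plus two any() scans
-- (objective: simpler). Equivalence is about the RETURN value; both Pythons mutate letterscores in place.


-- ===== PORT A =====
-- the for-i-in-range(len(places)) loop of A, threading (letterscores, isdouble, istriple);
-- letterscores[i] is read with pyGet? (none = IndexError, excluded by Pre_);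
-- places[i] is read directly under the loop bound i < places.length, which is exact for range indices
def multsLoopA (places : List Int) (i : Nat) (st : List Int × Bool × Bool) :
    List Int × Bool × Bool :=
  if h : i < places.length then
    let p := places[i]
    let (sc, d, t) := st
    multsLoopA places (i + 1)
      (if PySem.Int.mod p 6 == 3 then
        (match PySem.List.pyGet? sc (i : Int) with
         | some v => sc.set i (v * 2)
         | none => sc, d, t)
      else if PySem.Int.mod p 5 == 0 then
        (match PySem.List.pyGet? sc (i : Int) with
         | some v => sc.set i (v * 3)
         | none => sc, d, t)
      else if PySem.Int.mod p 7 == 0 && PySem.Int.mod p 8 != 0 then (sc, true, t)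
      else if PySem.Int.mod p 8 == 0 then (sc, d, true)
      else (sc, d, t))
  else st
termination_by places.length - i

def mults (letterscoresnplaces : List (List Int)) : List Int × Bool × Bool :=
  let letterscores := (PySem.List.pyGet? letterscoresnplaces 0).getD []
  let places := (PySem.List.pyGet? letterscoresnplaces 1).getD []
  multsLoopA places 0 (letterscores, false, false)

-- ===== PORT B =====
-- pass 1 of Source B: for i, p in enumerate(places): apply only the multipliers in place
def multsStepB (sc : List Int) (pi : Int × Nat) : List Int :=
  if PySem.Int.mod pi.1 6 == 3 then
    match PySem.List.pyGet? sc (pi.2 : Int) with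
    | some v => sc.set pi.2 (v * 2)
    | none => sc
  else if PySem.Int.mod pi.1 5 == 0 then
    match PySem.List.pyGet? sc (pi.2 : Int) with
    | some v => sc.set pi.2 (v * 3)
    | none => sc
  else sc

def multsDoubleP (p : Int) : Bool :=
  PySem.Int.mod p 6 != 3 && PySem.Int.mod p 5 != 0 &&
  PySem.Int.mod p 7 == 0 && PySem.Int.mod p 8 != 0

def multsTripleP (p : Int) : Bool :=
  PySem.Int.mod p 6 != 3 && PySem.Int.mod p 5 != 0 && PySem.Int.mod p 8 == 0

def mults_alt (letterscoresnplaces : List (List Int)) : List Int × Bool × Bool :=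
  let letterscores := (PySem.List.pyGet? letterscoresnplaces 0).getD []
  let places := (PySem.List.pyGet? letterscoresnplaces 1).getD []
  let letterscores' := (places.zipIdx).foldl multsStepB letterscores
  let isdouble := places.any multsDoubleP
  let istriple := places.any multsTripleP
  (letterscores', isdouble, istriple)

-- ===== PRECONDITION & SPEC =====
-- Pre_: the Python raises IndexError unless the outer list has the two sublists and every place
-- whose position takes a multiplier branch has that position in range of letterscores.
def Pre_mults (letterscoresnplaces : List (List Int)) : Prop :=
  2 ≤ letterscoresnplaces.length ∧
  ∀ pi ∈ (letterscoresnplaces.getD 1 []).zipIdx,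
    (PySem.Int.mod pi.1 6 = 3 ∨ PySem.Int.mod pi.1 5 = 0) →
    pi.2 < (letterscoresnplaces.getD 0 []).length
instance (letterscoresnplaces : List (List Int)) : Decidable (Pre_mults letterscoresnplaces) := by
  unfold Pre_mults; infer_instance

def pvWitness_mults : List (List Int) := [[1, 2, 3], [3, 10, 7]]

def Spec_mults (letterscoresnplaces : List (List Int)) (out : List Int × Bool × Bool) : Prop := out = mults_alt letterscoresnplaces
instance (letterscoresnplaces : List (List Int)) (out : List Int × Bool × Bool) : Decidable (Spec_mults letterscoresnplaces out) := by unfold Spec_mults; infer_instance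

-- ===== CLAIM (what is proved, stated in full; the proofs are below) =====
def Claim_equal_mults : Prop := ∀ (letterscoresnplaces : List (List Int)), Dom_mults letterscoresnplaces → Pre_mults letterscoresnplaces → Spec_mults letterscoresnplaces (mults letterscoresnplaces)

-- ===== LEMMAS AND PROOFS =====

-- A's loop from index i equals B's three passes over the remaining suffix places.drop i
theorem multsLoopA_eq (places : List Int) (i : Nat) (sc : List Int) (d t : Bool) :
    multsLoopA places i (sc, d, t) =
      (((places.drop i).zipIdx i).foldl multsStepB sc,
       d || (places.drop i).any multsDoubleP,
       t || (places.drop i).any multsTripleP) := by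
  induction hn : places.length - i generalizing i sc d t with
  | zero =>
    rw [multsLoopA]
    have hle : places.length ≤ i := by omega
    simp [Nat.not_lt.mpr hle, List.drop_eq_nil_of_le hle]
  | succ n ih =>
    have h : i < places.length := by omega
    rw [multsLoopA]
    simp only [h, dif_pos]
    have hdrop : places.drop i = places[i] :: places.drop (i + 1) :=
      List.drop_eq_getElem_cons h
    have ih' := fun sc d t => ih (i + 1) sc d t (by omega)
    set p := places[i] with hp
    rw [hdrop, List.zipIdx_cons, List.foldl_cons, List.any_cons, List.any_cons]
    cases h6 : (PySem.Int.mod p 6 == 3) with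
    | true =>
      rw [if_pos rfl, ih']
      simp only [multsStepB, multsDoubleP, multsTripleP, h6, bne]
      simp
    | false =>
      rw [if_neg Bool.false_ne_true]
      cases h5 : (PySem.Int.mod p 5 == 0) with
      | true =>
        rw [if_pos rfl, ih']
        simp only [multsStepB, multsDoubleP, multsTripleP, h6, h5, bne]
        simp
      | false =>
        rw [if_neg Bool.false_ne_true]
        cases h78 : (PySem.Int.mod p 7 == 0 && PySem.Int.mod p 8 != 0) with
        | true =>
          rw [if_pos rfl, ih']
          simp only [multsStepB, multsDoubleP, multsTripleP, h6, h5, bne]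
          simp_all
          have h8f : (places[i] % 8 == 0) = false := by simp [h78.2]
          simp [h8f]
        | false =>
          rw [if_neg Bool.false_ne_true]
          cases h8 : (PySem.Int.mod p 8 == 0) with
          | true =>
            rw [if_pos rfl, ih']
            simp only [multsStepB, multsDoubleP, multsTripleP, h6, h5, h8, bne]
            simp_all
          | false =>
            rw [if_neg Bool.false_ne_true]
            rw [ih']
            simp only [multsStepB, multsDoubleP, multsTripleP, h6, h5, h8, bne]
            simp_all
            have h7f : (places[i] % 7 == 0) = false := by simp [h78]
            simp [h7f]

-- ===== VERDICT (by name: the statement is the Claim_ definition above) =====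
theorem mults_spec : Claim_equal_mults := by
  intro l _ _
  unfold Spec_mults mults mults_alt
  simp only [multsLoopA_eq, List.drop_zero, Bool.false_or]
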